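-- pv_equiv track=rewrite | github.com/balker0322/advent_of_code_2022 | 15/part1.py | get_no_beacon_coor_list
-- ===== SOURCE A (Python) =====
-- def get_manhattan_distance(p1, p2):
--     return abs(p1[0]-p2[0]) + abs(p1[1]-p2[1])
--
-- def get_no_beacon_coor_list(s, b, y_filter=None):
--     no_beacon_coor_list = []
--     max_distance = get_manhattan_distance(s, b)
--     for i in range(-max_distance, max_distance+1):
--         dummy = [s[0] + i, y_filter]
--         if get_manhattan_distance(s, dummy) <= max_distance:
--             no_beacon_coor_list.append(dummy)
--     if b in no_beacon_coor_list:
--         no_beacon_coor_list.remove(b)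
--     return no_beacon_coor_list
-- ===== SOURCE B (Python) =====
-- def get_no_beacon_coor_list(s, b, y_filter=None):
--     max_distance = abs(s[0] - b[0]) + abs(s[1] - b[1])
--     remaining = max_distance - abs(s[1] - y_filter)
--     return [[x, y_filter] for x in range(s[0] - remaining, s[0] + remaining + 1)
--             if [x, y_filter] != b]
-- ===== Notes on version B (the rewrite author's own statement) =====
-- stated objective: simpler
-- what changed: Instead of scanning all 2*max_distance+1 candidate x-offsets and testing each Manhattan distance, B computes the covered half-width remaining = max_distance - |s[1]-y_filter| and emits the interval [s[0]-remaining, s[0]+remaining] directly, skipping the beacon with a comprehension filter instead of a membership-test-plus-remove pass.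
import Mathlib
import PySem

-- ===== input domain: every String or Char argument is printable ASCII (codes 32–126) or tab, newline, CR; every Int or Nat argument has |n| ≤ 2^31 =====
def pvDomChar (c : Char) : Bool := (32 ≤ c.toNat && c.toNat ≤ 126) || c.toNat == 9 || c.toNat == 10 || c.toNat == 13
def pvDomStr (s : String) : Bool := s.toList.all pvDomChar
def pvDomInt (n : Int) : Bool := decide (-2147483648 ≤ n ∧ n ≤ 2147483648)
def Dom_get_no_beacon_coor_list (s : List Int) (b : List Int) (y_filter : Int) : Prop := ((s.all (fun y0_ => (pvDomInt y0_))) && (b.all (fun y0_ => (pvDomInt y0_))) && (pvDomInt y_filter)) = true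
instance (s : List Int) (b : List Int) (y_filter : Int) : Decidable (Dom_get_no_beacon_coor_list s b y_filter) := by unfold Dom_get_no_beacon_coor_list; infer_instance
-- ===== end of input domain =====

-- B computes the covered interval on the row directly from the remaining half-width
-- remaining = max_distance - |s[1]-y_filter| instead of scanning all candidate offsets
-- and testing each, and skips the beacon with a comprehension filter instead of a
-- membership-test-plus-remove pass (simpler: one direct pass).

-- ===== PORT A =====
-- list indexing p[0]/p[1] is ported with pyGetD (default 0): exact under Pre_, which
-- guarantees both points have length ≥ 2 (otherwise Python raises IndexError).
def get_manhattan_distance (p1 p2 : List Int) : Int :=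
  |PySem.List.pyGetD p1 0 0 - PySem.List.pyGetD p2 0 0| +
  |PySem.List.pyGetD p1 1 0 - PySem.List.pyGetD p2 1 0|

def get_no_beacon_coor_list (s : List Int) (b : List Int) (y_filter : Int) : List (List Int) :=
  let max_distance := get_manhattan_distance s b
  let no_beacon_coor_list :=
    (PySem.List.pyRange (-max_distance) (max_distance + 1) 1).foldl
      (fun acc i =>
        let dummy := [PySem.List.pyGetD s 0 0 + i, y_filter]
        if get_manhattan_distance s dummy ≤ max_distance then acc ++ [dummy] else acc) []
  if b ∈ no_beacon_coor_list then
    (PySem.List.remove? no_beacon_coor_list b).getD no_beacon_coor_list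
  else no_beacon_coor_list

-- ===== PORT B =====
-- '[[x, y_filter] for x in range(lo, hi) if [x, y_filter] != b]' ported as
-- filter-then-map over the same range.
def get_no_beacon_coor_list_alt (s : List Int) (b : List Int) (y_filter : Int) : List (List Int) :=
  let max_distance := |PySem.List.pyGetD s 0 0 - PySem.List.pyGetD b 0 0| +
                      |PySem.List.pyGetD s 1 0 - PySem.List.pyGetD b 1 0|
  let remaining := max_distance - |PySem.List.pyGetD s 1 0 - y_filter|
  ((PySem.List.pyRange (PySem.List.pyGetD s 0 0 - remaining)
      (PySem.List.pyGetD s 0 0 + remaining + 1) 1).filter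
    (fun x => [x, y_filter] != b)).map (fun x => [x, y_filter])

-- ===== PRECONDITION & SPEC =====
-- Pre_ excludes exactly the inputs where Python A raises IndexError (a point with
-- fewer than 2 coordinates); A returns normally on every other input.
def Pre_get_no_beacon_coor_list (s : List Int) (b : List Int) (y_filter : Int) : Prop :=
  2 ≤ s.length ∧ 2 ≤ b.length
instance (s : List Int) (b : List Int) (y_filter : Int) : Decidable (Pre_get_no_beacon_coor_list s b y_filter) := by unfold Pre_get_no_beacon_coor_list; infer_instance

def pvWitness_get_no_beacon_coor_list : List Int × List Int × Int := ([2, 3], [4, 5], 3)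

def Spec_get_no_beacon_coor_list (s : List Int) (b : List Int) (y_filter : Int) (out : List (List Int)) : Prop := out = get_no_beacon_coor_list_alt s b y_filter
instance (s : List Int) (b : List Int) (y_filter : Int) (out : List (List Int)) : Decidable (Spec_get_no_beacon_coor_list s b y_filter out) := by unfold Spec_get_no_beacon_coor_list; infer_instance

-- ===== CLAIM (what is proved, stated in full; the proofs are below) =====
def Claim_equal_get_no_beacon_coor_list : Prop := ∀ (s : List Int) (b : List Int) (y_filter : Int), Dom_get_no_beacon_coor_list s b y_filter → Pre_get_no_beacon_coor_list s b y_filter → Spec_get_no_beacon_coor_list s b y_filter (get_no_beacon_coor_list s b y_filter)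

-- ===== LEMMAS AND PROOFS =====

-- filtering a unit-step range by an interval predicate yields the clipped range
lemma filter_pyRange_interval (a b lo hi : Int) :
    (PySem.List.pyRange a b 1).filter (fun i => decide (lo ≤ i ∧ i ≤ hi)) =
      PySem.List.pyRange (max a lo) (min b (hi + 1)) 1 := by
  generalize h : (b - a).toNat = n
  induction n generalizing a with
  | zero =>
    rw [PySem.List.pyRange_one_eq_nil (by omega), List.filter_nil,
        PySem.List.pyRange_one_eq_nil (by omega)]
  | succ n ih =>
    have hab : a < b := by omega
    rw [PySem.List.pyRange_one_cons hab, List.filter_cons]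
    have ih' := ih (a + 1) (by omega)
    by_cases hc : lo ≤ a ∧ a ≤ hi
    · simp only [hc, decide_true, if_true, and_self]
      rw [ih', show max (a+1) lo = a + 1 by omega, show max a lo = a by omega,
          PySem.List.pyRange_one_cons (by omega : a < min b (hi+1))]
    · simp only [hc, decide_false, if_false, Bool.false_eq_true]
      rw [ih']
      rcases not_and_or.mp hc with h | h
      · rw [show max (a+1) lo = max a lo by omega]
      · rw [PySem.List.pyRange_one_eq_nil (by omega), PySem.List.pyRange_one_eq_nil (by omega)]

-- shifting a unit-step range under the pair-building map
lemma map_pyRange_shift_pair (a b c y : Int) :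
    (PySem.List.pyRange a b 1).map (fun i => [c + i, y]) =
      (PySem.List.pyRange (c + a) (c + b) 1).map (fun x : Int => [x, y]) := by
  rw [PySem.List.pyRange_one, PySem.List.pyRange_one, List.map_map, List.map_map,
      show (c + b) - (c + a) = b - a by ring]
  apply List.map_congr_left
  intro k _
  simp only [Function.comp, List.cons.injEq, and_true]
  ring

-- A's scan over [-md, md] equals B's directly computed interval, mapped to pairs
lemma scan_eq_interval (s0 s1 y md : Int) :
    (PySem.List.pyRange (-md) (md + 1) 1).foldl
      (fun acc i => if |s0 - (s0 + i)| + |s1 - y| ≤ md then acc ++ [[s0 + i, y]] else acc) [] =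
    (PySem.List.pyRange (s0 - (md - |s1 - y|)) (s0 + (md - |s1 - y|) + 1) 1).map
      (fun x : Int => [x, y]) := by
  rw [PySem.List.foldl_append_ite, List.nil_append]
  have hcong : ∀ i ∈ PySem.List.pyRange (-md) (md + 1) 1,
      (decide (|s0 - (s0 + i)| + |s1 - y| ≤ md))
        = (decide (-(md - |s1 - y|) ≤ i ∧ i ≤ md - |s1 - y|)) := by
    intro i _
    rw [decide_eq_decide, show s0 - (s0 + i) = -i from by ring, abs_neg]
    constructor
    · intro h; exact abs_le.mp (by linarith)
    · intro h; have := abs_le.mpr h; linarith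
  rw [List.filter_congr hcong, filter_pyRange_interval]
  have hd : (0:Int) ≤ |s1 - y| := abs_nonneg _
  rw [show max (-md) (-(md - |s1 - y|)) = -(md - |s1 - y|) by omega,
      show min (md + 1) (md - |s1 - y| + 1) = md - |s1 - y| + 1 by omega,
      map_pyRange_shift_pair,
      show s0 + -(md - |s1 - y|) = s0 - (md - |s1 - y|) by ring,
      show s0 + (md - |s1 - y| + 1) = s0 + (md - |s1 - y|) + 1 by ring]

-- on a nodup base list, Python's membership-test-plus-remove equals a filter
lemma remove_step (M : List Int) (y : Int) (b : List Int) (hM : M.Nodup) :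
    (if b ∈ M.map (fun x : Int => [x, y]) then
       (PySem.List.remove? (M.map (fun x : Int => [x, y])) b).getD (M.map (fun x : Int => [x, y]))
     else M.map (fun x : Int => [x, y]))
    = (M.filter (fun x => [x, y] != b)).map (fun x : Int => [x, y]) := by
  have hinj : Function.Injective (fun x : Int => [x, y]) := by
    intro a a' h; simpa using h
  have hnd : (M.map (fun x : Int => [x, y])).Nodup := hM.map hinj
  have hfilter : ∀ (N : List Int), (N.filter (fun x => [x, y] != b)).map (fun x : Int => [x, y])
      = (N.map (fun x : Int => [x, y])).filter (fun l => l != b) := by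
    intro N
    induction N with
    | nil => rfl
    | cons a t ih =>
      simp only [List.map_cons, List.filter_cons]
      cases h : ([a, y] != b) <;> simp [h, ih]
  rw [hfilter]
  by_cases hb : b ∈ M.map (fun x : Int => [x, y])
  · rw [if_pos hb, PySem.List.remove?_eq_some_erase _ b hb]
    simp only [Option.getD_some]
    exact hnd.erase_eq_filter b
  · rw [if_neg hb]
    refine (List.filter_eq_self.mpr ?_).symm
    intro a ha
    exact bne_iff_ne.mpr (fun h => hb (h ▸ ha))

-- A's whole body equals B's whole body, for any scan list given by the loop
lemma body_eq (b : List Int) (s0 s1 y md : Int) (nbl : List (List Int))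
    (hn : nbl = (PySem.List.pyRange (-md) (md + 1) 1).foldl
      (fun acc i => if |s0 - (s0 + i)| + |s1 - y| ≤ md then acc ++ [[s0 + i, y]] else acc) []) :
    (if b ∈ nbl then (PySem.List.remove? nbl b).getD nbl else nbl)
      = ((PySem.List.pyRange (s0 - (md - |s1 - y|)) (s0 + (md - |s1 - y|) + 1) 1).filter
          (fun x => [x, y] != b)).map (fun x : Int => [x, y]) := by
  subst hn
  rw [scan_eq_interval]
  exact remove_step _ y b (PySem.List.nodup_pyRange_one _ _)

-- ===== VERDICT (by name: the statement is the Claim_ definition above) =====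
theorem get_no_beacon_coor_list_spec : Claim_equal_get_no_beacon_coor_list := by
  intro s b y _ _
  show get_no_beacon_coor_list s b y = get_no_beacon_coor_list_alt s b y
  -- pyGetD on the two-element literal [s0+i, y_filter] reduces definitionally, so A's
  -- loop body is definitionally the clean scan of body_eq
  exact body_eq b (PySem.List.pyGetD s 0 0) (PySem.List.pyGetD s 1 0) y
    (|PySem.List.pyGetD s 0 0 - PySem.List.pyGetD b 0 0| +
     |PySem.List.pyGetD s 1 0 - PySem.List.pyGetD b 1 0|) _ rfl
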